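-- pv_equiv track=rewrite | github.com/DOMIAXEGDE/C700Hardware | dimension-generator.py | has_adjacent_conflict
-- ===== SOURCE A (Python) =====
-- import math
-- from typing import List, Tuple, Optional
--
-- def is_perfect_square(n: int) -> bool:
--     if n <= 0:
--         return False
--     r = int(math.isqrt(n))
--     return r * r == n
--
-- def has_adjacent_conflict(indexes: List[int], wrap: bool = False) -> bool:
--     if not is_perfect_square(len(indexes)):
--         return True
--     m = int(math.isqrt(len(indexes)))
--
--     def idx(r, c):
--         return indexes[r * m + c]
--
--     for r in range(m):
--         for c in range(m):
--             cur = idx(r, c)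
--             # right
--             rr, cc = r, c + 1
--             if cc < m:
--                 if cur == idx(rr, cc):
--                     return True
--             elif wrap and m > 1:
--                 if cur == idx(r, 0):
--                     return True
--             # down
--             rr, cc = r + 1, c
--             if rr < m:
--                 if cur == idx(rr, cc):
--                     return True
--             elif wrap and m > 1:
--                 if cur == idx(0, c):
--                     return True
--     return False
-- ===== SOURCE B (Python) =====
-- import math
--
-- def has_adjacent_conflict(indexes, wrap=False):
--     n = len(indexes)
--     m = math.isqrt(n) if n > 0 else 0
--     if m == 0 or m * m != n:
--         return True
--     if m == 1:
--         return False
--     rows = [indexes[r * m:(r + 1) * m] for r in range(m)]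
--     cols = [list(col) for col in zip(*rows)]
--
--     def line_conflict(line):
--         return any(a == b for a, b in zip(line, line[1:])) or (wrap and line[-1] == line[0])
--
--     return any(line_conflict(line) for line in rows) or any(line_conflict(line) for line in cols)
-- ===== Notes on version B (the rewrite author's own statement) =====
-- stated objective: simpler
-- what changed: Replaces the single row-major cell loop with four interleaved neighbour/wrap branches by materialising the rows, transposing them for the columns, and running one uniform consecutive-pair-plus-wrap check over every line.
import Mathlib
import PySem

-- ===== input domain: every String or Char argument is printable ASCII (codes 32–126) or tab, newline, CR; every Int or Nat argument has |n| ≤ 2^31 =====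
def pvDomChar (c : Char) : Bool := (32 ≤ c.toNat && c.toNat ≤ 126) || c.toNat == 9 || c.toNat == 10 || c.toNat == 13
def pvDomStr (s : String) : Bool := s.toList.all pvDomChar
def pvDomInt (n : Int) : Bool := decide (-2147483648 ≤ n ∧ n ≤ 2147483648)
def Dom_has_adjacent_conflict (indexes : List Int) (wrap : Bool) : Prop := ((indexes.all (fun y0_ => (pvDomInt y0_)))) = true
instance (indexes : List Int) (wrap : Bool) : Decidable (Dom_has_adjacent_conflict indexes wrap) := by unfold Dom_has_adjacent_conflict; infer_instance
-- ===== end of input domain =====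

-- B replaces A's single row-major cell loop (four interleaved neighbour/wrap branches per cell)
-- by materialising the rows, transposing them for the columns, and running one uniform
-- consecutive-pair-plus-wrap check over every line; simpler, same cost.


-- ===== PORT A =====
-- math.isqrt is exact integer sqrt; Python guard n <= 0 keeps the argument nonnegative.
def is_perfect_square (n : Int) : Bool :=
  if n ≤ 0 then false
  else
    let r : Int := ((Nat.sqrt n.toNat : Nat) : Int)
    r * r == n

-- idx r c = indexes[r*m+c]: every access in A is in range (r,c < m, len = m*m),
-- so List.getD with default 0 is exact here.
def has_adjacent_conflict (indexes : List Int) (wrap : Bool) : Bool :=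
  if ¬ (is_perfect_square (indexes.length : Int) = true) then true
  else
    let m := Nat.sqrt indexes.length
    let idx := fun (r c : Nat) => indexes.getD (r * m + c) 0
    (List.range m).any (fun r => (List.range m).any (fun c =>
      let cur := idx r c
      ((if c + 1 < m then cur == idx r (c + 1)
        else wrap && decide (1 < m) && (cur == idx r 0))
       ||
       (if r + 1 < m then cur == idx (r + 1) c
        else wrap && decide (1 < m) && (cur == idx 0 c)))))

-- ===== PORT B =====
-- line[-1] / line[0]: every line handed to line_conflict is nonempty (m ≥ 2),
-- so getLastD/headD are exact.
def line_conflict (wrap : Bool) (line : List Int) : Bool :=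
  ((line.zip line.tail).any (fun p => p.1 == p.2))
  || (wrap && (line.getLastD 0 == line.headD 0))

-- rows: the slices indexes[r*m:(r+1)*m]; cols: zip(*rows) (the transpose; row.getD c 0
-- is exact since every row has length m > c).
def has_adjacent_conflict_alt (indexes : List Int) (wrap : Bool) : Bool :=
  let n := indexes.length
  let m := if 0 < n then Nat.sqrt n else 0
  if m = 0 || ¬ (m * m = n) then true
  else if m = 1 then false
  else
    let rows := (List.range m).map (fun r => (indexes.drop (r * m)).take m)
    let cols := (List.range m).map (fun c => rows.map (fun row => row.getD c 0))
    (rows.any (line_conflict wrap)) || (cols.any (line_conflict wrap))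

-- ===== PRECONDITION & SPEC =====
def Spec_has_adjacent_conflict (indexes : List Int) (wrap : Bool) (out : Bool) : Prop := out = has_adjacent_conflict_alt indexes wrap
instance (indexes : List Int) (wrap : Bool) (out : Bool) : Decidable (Spec_has_adjacent_conflict indexes wrap out) := by unfold Spec_has_adjacent_conflict; infer_instance

-- ===== CLAIM (what is proved, stated in full; the proofs are below) =====
def Claim_equal_has_adjacent_conflict : Prop := ∀ (indexes : List Int) (wrap : Bool), Dom_has_adjacent_conflict indexes wrap → Spec_has_adjacent_conflict indexes wrap (has_adjacent_conflict indexes wrap)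

-- ===== LEMMAS AND PROOFS =====

lemma zip_tail_any (l : List Int) (p : Int × Int → Bool) :
    ((l.zip l.tail).any p = true) ↔ ∃ i, ∃ _h : i + 1 < l.length, p (l[i], l[i+1]) = true := by
  rw [List.any_eq_true]
  constructor
  · rintro ⟨x, hx, hp⟩
    obtain ⟨i, hi, rfl⟩ := List.mem_iff_getElem.1 hx
    have hi' : i + 1 < l.length := by
      simp [List.length_zip, List.length_tail] at hi; omega
    refine ⟨i, hi', ?_⟩
    simpa [List.getElem_zip, List.getElem_tail] using hp
  · rintro ⟨i, hi, hp⟩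
    refine ⟨(l[i], l[i+1]), ?_, hp⟩
    rw [List.mem_iff_getElem]
    refine ⟨i, by simp [List.length_zip, List.length_tail]; omega, ?_⟩
    simp [List.getElem_zip, List.getElem_tail]

lemma headD_eq (l : List Int) (d : Int) (h : 0 < l.length) : l.headD d = l[0] := by
  cases l with
  | nil => simp at h
  | cons a t => rfl

lemma getLastD_eq (l : List Int) (d : Int) (h : 0 < l.length) : l.getLastD d = l[l.length - 1] := by
  cases l with
  | nil => simp at h
  | cons a t =>
    simp [List.getLastD_eq_getLast?, List.getLast?_eq_getElem?]
    rfl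

lemma row_len (indexes : List Int) (m r : Nat) (hlen : indexes.length = m*m) (hr : r < m) :
    ((indexes.drop (r*m)).take m).length = m := by
  have h : r*m + m ≤ m*m := by
    have := Nat.mul_le_mul_right m (Nat.succ_le_of_lt hr)
    simpa [Nat.succ_mul] using this
  simp [List.length_take, List.length_drop, hlen]
  omega

lemma row_getElem (indexes : List Int) (m r : Nat) (hlen : indexes.length = m*m) (hr : r < m) :
    ∀ (c : Nat) (hc : c < ((indexes.drop (r*m)).take m).length),
      ((indexes.drop (r*m)).take m)[c] = indexes.getD (r*m+c) 0 := by
  intro c hc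
  have hc' : c < m := by rwa [row_len indexes m r hlen hr] at hc
  have hb : r*m + c < indexes.length := by
    have := Nat.mul_le_mul_right m (Nat.succ_le_of_lt hr)
    rw [hlen]; rw [Nat.succ_mul] at this; omega
  rw [List.getElem_take, List.getElem_drop, List.getD_eq_getElem _ _ hb]

lemma row_eq_map (indexes : List Int) (m r : Nat) (hlen : indexes.length = m*m) (hr : r < m) :
    (indexes.drop (r*m)).take m = (List.range m).map (fun c => indexes.getD (r*m+c) 0) := by
  apply List.ext_getElem
  · simp [row_len indexes m r hlen hr]
  · intro i h1 h2
    simp [row_getElem indexes m r hlen hr]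

lemma line_map (f : Nat → Int) (wrap : Bool) (m : Nat) (hm : 2 ≤ m) :
    (line_conflict wrap ((List.range m).map f) = true) ↔
      ((∃ i, i + 1 < m ∧ f i = f (i+1)) ∨ (wrap = true ∧ f (m-1) = f 0)) := by
  have hlen : ((List.range m).map f).length = m := by simp
  have h0 : 0 < ((List.range m).map f).length := by omega
  unfold line_conflict
  rw [Bool.or_eq_true, zip_tail_any, Bool.and_eq_true, beq_iff_eq,
      headD_eq _ 0 h0, getLastD_eq _ 0 h0]
  simp only [hlen, List.getElem_map, List.getElem_range, exists_prop, beq_iff_eq]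

lemma col_eq_map (indexes : List Int) (m c : Nat) (hlen : indexes.length = m*m) (hc : c < m) :
    ((List.range m).map (fun r => (indexes.drop (r*m)).take m)).map (fun row => row.getD c 0)
      = (List.range m).map (fun r => indexes.getD (r*m+c) 0) := by
  rw [List.map_map]
  apply List.map_congr_left
  intro r hr
  rw [List.mem_range] at hr
  have hcl : c < ((indexes.drop (r*m)).take m).length := by
    rw [row_len indexes m r hlen hr]; omega
  simp only [Function.comp_apply]
  rw [List.getD_eq_getElem _ _ hcl, row_getElem indexes m r hlen hr]

lemma main_iff (indexes : List Int) (wrap : Bool) (m : Nat)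
    (hm : 2 ≤ m) (hlen : indexes.length = m*m) :
    ((List.range m).any (fun r => (List.range m).any (fun c =>
      ((if c + 1 < m then indexes.getD (r*m+c) 0 == indexes.getD (r*m+(c+1)) 0
        else wrap && decide (1 < m) && (indexes.getD (r*m+c) 0 == indexes.getD (r*m+0) 0))
       || (if r + 1 < m then indexes.getD (r*m+c) 0 == indexes.getD ((r+1)*m+c) 0
        else wrap && decide (1 < m) && (indexes.getD (r*m+c) 0 == indexes.getD (0*m+c) 0))))))
    = ((((List.range m).map (fun r => (indexes.drop (r*m)).take m)).any (line_conflict wrap))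
       || (((List.range m).map (fun c => ((List.range m).map (fun r => (indexes.drop (r*m)).take m)).map (fun row => row.getD c 0))).any (line_conflict wrap))) := by
  rw [Bool.eq_iff_iff]
  -- characterise B's right-hand side
  have hrow : ∀ r, r < m →
      ((line_conflict wrap ((indexes.drop (r*m)).take m)) = true ↔
        ((∃ i, i + 1 < m ∧ indexes.getD (r*m+i) 0 = indexes.getD (r*m+(i+1)) 0)
         ∨ (wrap = true ∧ indexes.getD (r*m+(m-1)) 0 = indexes.getD (r*m+0) 0))) := by
    intro r hr
    rw [row_eq_map indexes m r hlen hr, line_map _ wrap m hm]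
  have hcol : ∀ c, c < m →
      ((line_conflict wrap (((List.range m).map (fun r => (indexes.drop (r*m)).take m)).map (fun row => row.getD c 0))) = true ↔
        ((∃ i, i + 1 < m ∧ indexes.getD (i*m+c) 0 = indexes.getD ((i+1)*m+c) 0)
         ∨ (wrap = true ∧ indexes.getD ((m-1)*m+c) 0 = indexes.getD (0*m+c) 0))) := by
    intro c hc
    rw [col_eq_map indexes m c hlen hc, line_map _ wrap m hm]
  rw [Bool.or_eq_true]
  simp only [List.any_map, List.any_eq_true, List.mem_range, Function.comp_apply]
  have h1m : (1:Nat) < m := by omega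
  constructor
  · rintro ⟨r, hr, c, hc, hB⟩
    rw [Bool.or_eq_true] at hB
    rcases hB with hB | hB
    · by_cases h1 : c + 1 < m
      · rw [if_pos h1, beq_iff_eq] at hB
        exact Or.inl ⟨r, hr, (hrow r hr).2 (Or.inl ⟨c, h1, hB⟩)⟩
      · rw [if_neg h1] at hB
        simp only [Bool.and_eq_true, decide_eq_true_eq, beq_iff_eq] at hB
        have hcm : c = m - 1 := by omega
        subst hcm
        exact Or.inl ⟨r, hr, (hrow r hr).2 (Or.inr ⟨hB.1.1, hB.2⟩)⟩
    · by_cases h1 : r + 1 < m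
      · rw [if_pos h1, beq_iff_eq] at hB
        exact Or.inr ⟨c, hc, (hcol c hc).2 (Or.inl ⟨r, h1, hB⟩)⟩
      · rw [if_neg h1] at hB
        simp only [Bool.and_eq_true, decide_eq_true_eq, beq_iff_eq] at hB
        have hrm : r = m - 1 := by omega
        subst hrm
        exact Or.inr ⟨c, hc, (hcol c hc).2 (Or.inr ⟨hB.1.1, hB.2⟩)⟩
  · rintro (⟨r, hr, hL⟩ | ⟨c, hc, hL⟩)
    · rcases (hrow r hr).1 hL with ⟨i, hi, he⟩ | ⟨hw, he⟩
      · refine ⟨r, hr, i, by omega, ?_⟩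
        rw [Bool.or_eq_true]
        exact Or.inl (by rw [if_pos hi, beq_iff_eq]; exact he)
      · refine ⟨r, hr, m - 1, by omega, ?_⟩
        rw [Bool.or_eq_true]
        refine Or.inl ?_
        rw [if_neg (by omega : ¬ (m - 1 + 1 < m))]
        simp only [Bool.and_eq_true, decide_eq_true_eq, beq_iff_eq]
        exact ⟨⟨hw, h1m⟩, he⟩
    · rcases (hcol c hc).1 hL with ⟨i, hi, he⟩ | ⟨hw, he⟩
      · refine ⟨i, by omega, c, hc, ?_⟩
        rw [Bool.or_eq_true]
        exact Or.inr (by rw [if_pos hi, beq_iff_eq]; exact he)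
      · refine ⟨m - 1, by omega, c, hc, ?_⟩
        rw [Bool.or_eq_true]
        refine Or.inr ?_
        rw [if_neg (by omega : ¬ (m - 1 + 1 < m))]
        simp only [Bool.and_eq_true, decide_eq_true_eq, beq_iff_eq]
        exact ⟨⟨hw, h1m⟩, he⟩

lemma ips_iff (n : Nat) :
    (is_perfect_square (n : Int) = true) ↔ (0 < n ∧ Nat.sqrt n * Nat.sqrt n = n) := by
  unfold is_perfect_square
  by_cases h : (n : Int) ≤ 0
  · rw [if_pos h]
    constructor
    · intro hf; exact absurd hf (by simp)
    · intro hx; exfalso; omega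
  · rw [if_neg h]
    have hn : (0:Int) < n := by omega
    constructor
    · intro he
      simp only [Int.toNat_natCast, beq_iff_eq] at he
      refine ⟨by exact_mod_cast hn, by exact_mod_cast he⟩
    · rintro ⟨-, he⟩
      simp only [Int.toNat_natCast, beq_iff_eq]
      exact_mod_cast he

-- ===== VERDICT (by name: the statement is the Claim_ definition above) =====
theorem has_adjacent_conflict_spec : Claim_equal_has_adjacent_conflict := by
  intro indexes wrap _
  unfold Spec_has_adjacent_conflict has_adjacent_conflict has_adjacent_conflict_alt
  simp only []
  by_cases hpos : 0 < indexes.length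
  · by_cases hsq : Nat.sqrt indexes.length * Nat.sqrt indexes.length = indexes.length
    · have hips : is_perfect_square (indexes.length : Int) = true := (ips_iff _).2 ⟨hpos, hsq⟩
      have hm1 : 0 < Nat.sqrt indexes.length := by
        rcases Nat.eq_zero_or_pos (Nat.sqrt indexes.length) with h | h
        · rw [h] at hsq; omega
        · exact h
      rw [if_neg (by simp [hips])]
      rw [if_pos hpos, if_neg (by simp [hsq]; omega)]
      by_cases hm2 : 2 ≤ Nat.sqrt indexes.length
      · rw [if_neg (by omega : ¬ Nat.sqrt indexes.length = 1)]
        exact main_iff indexes wrap (Nat.sqrt indexes.length) hm2 hsq.symm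
      · have hm : Nat.sqrt indexes.length = 1 := by omega
        rw [if_pos hm]
        rw [hm] at hsq ⊢
        simp [List.range_one]
    · have hips : ¬ (is_perfect_square (indexes.length : Int) = true) := by
        rw [ips_iff]; intro h; exact hsq h.2
      rw [if_pos hips, if_pos hpos]
      rw [if_pos (by simp [hsq])]
  · have h0 : indexes.length = 0 := by omega
    have hips : ¬ (is_perfect_square (indexes.length : Int) = true) := by
      rw [ips_iff]; omega
    rw [if_pos hips, if_neg (by omega : ¬ 0 < indexes.length)]
    simp
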